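-- pv_equiv track=rewrite | github.com/ridho9/aoc-2021 | scripts/d19.py | genperm
-- ===== SOURCE A (Python) =====
-- def genperm(points, idx):
--     flip = idx % 6
--     if flip == 0:
--         points = [[x, y, z] for [x, y, z] in points]
--     if flip == 1:
--         points = [[z, y, -x] for [x, y, z] in points]
--     if flip == 2:
--         points = [[-x, y, -z] for [x, y, z] in points]
--     if flip == 3:
--         points = [[-z, y, x] for [x, y, z] in points]
--     if flip == 4:
--         points = [[y, -x, z] for [x, y, z] in points]
--     if flip == 5:
--         points = [[-y, x, z] for [x, y, z] in points]
--     rot = idx // 6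
--     if rot == 0:
--         points = [[x, z, -y] for [x, y, z] in points]
--     if rot == 1:
--         points = [[x, -y, -z] for [x, y, z] in points]
--     if rot == 2:
--         points = [[x, -z, y] for [x, y, z] in points]
--     return [tuple(p) for p in points]
-- ===== SOURCE B (Python) =====
-- _FLIPS = [
--     ((1, 0, 0), (0, 1, 0), (0, 0, 1)),
--     ((0, 0, 1), (0, 1, 0), (-1, 0, 0)),
--     ((-1, 0, 0), (0, 1, 0), (0, 0, -1)),
--     ((0, 0, -1), (0, 1, 0), (1, 0, 0)),
--     ((0, 1, 0), (-1, 0, 0), (0, 0, 1)),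
--     ((0, -1, 0), (1, 0, 0), (0, 0, 1)),
-- ]
--
-- _ROTS = {
--     0: ((1, 0, 0), (0, 0, 1), (0, -1, 0)),
--     1: ((1, 0, 0), (0, -1, 0), (0, 0, -1)),
--     2: ((1, 0, 0), (0, 0, -1), (0, 1, 0)),
-- }
--
-- _IDENT = ((1, 0, 0), (0, 1, 0), (0, 0, 1))
--
--
-- def _matmul(a, b):
--     return tuple(
--         tuple(sum(a[i][k] * b[k][j] for k in range(3)) for j in range(3))
--         for i in range(3)
--     )
--
--
-- def genperm(points, idx):
--     m = _matmul(_ROTS.get(idx // 6, _IDENT), _FLIPS[idx % 6])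
--     out = []
--     for p in points:
--         x, y, z = p
--         out.append((m[0][0] * x + m[0][1] * y + m[0][2] * z,
--                     m[1][0] * x + m[1][1] * y + m[1][2] * z,
--                     m[2][0] * x + m[2][1] * y + m[2][2] * z))
--     return out
-- ===== Notes on version B (the rewrite author's own statement) =====
-- stated objective: alternative
-- what changed: B selects the flip and rotation as 3x3 signed-permutation matrices, composes them once by matrix multiplication, and applies the composite in a single pass over the points, instead of A's up-to-three list-rebuilding comprehension passes.
import Mathlib
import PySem

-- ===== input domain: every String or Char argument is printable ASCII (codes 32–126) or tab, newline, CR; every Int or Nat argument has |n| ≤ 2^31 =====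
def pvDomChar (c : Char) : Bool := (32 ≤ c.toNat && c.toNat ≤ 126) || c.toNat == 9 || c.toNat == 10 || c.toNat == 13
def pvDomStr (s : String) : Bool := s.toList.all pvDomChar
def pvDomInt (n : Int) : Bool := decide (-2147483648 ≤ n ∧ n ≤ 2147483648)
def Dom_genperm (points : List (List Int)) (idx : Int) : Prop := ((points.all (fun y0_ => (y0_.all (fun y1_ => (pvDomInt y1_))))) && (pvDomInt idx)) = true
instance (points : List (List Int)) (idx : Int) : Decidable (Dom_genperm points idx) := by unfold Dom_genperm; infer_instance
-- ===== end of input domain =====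

-- B composes the flip and rotation into one signed-permutation matrix and applies it in a
-- single pass (objective: alternative decomposition, same O(n) cost).
-- On points that are not exactly 3-long both A and B raise ValueError; Pre_ excludes those.

-- ===== PORT A =====
-- unpacking '[x, y, z]' of a list; Pre_ guarantees length 3 (Python raises otherwise)
def unpack3 (p : List Int) : Int × Int × Int :=
  match p with
  | [x, y, z] => (x, y, z)
  | _ => (0, 0, 0)

def genperm (points : List (List Int)) (idx : Int) : List (Int × Int × Int) :=
  let flip := PySem.Int.mod idx 6
  let points := if flip = 0 then points.map (fun p => let (x, y, z) := unpack3 p; [x, y, z]) else points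
  let points := if flip = 1 then points.map (fun p => let (x, y, z) := unpack3 p; [z, y, -x]) else points
  let points := if flip = 2 then points.map (fun p => let (x, y, z) := unpack3 p; [-x, y, -z]) else points
  let points := if flip = 3 then points.map (fun p => let (x, y, z) := unpack3 p; [-z, y, x]) else points
  let points := if flip = 4 then points.map (fun p => let (x, y, z) := unpack3 p; [y, -x, z]) else points
  let points := if flip = 5 then points.map (fun p => let (x, y, z) := unpack3 p; [-y, x, z]) else points
  let rot := PySem.Int.floordiv idx 6
  let points := if rot = 0 then points.map (fun p => let (x, y, z) := unpack3 p; [x, z, -y]) else points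
  let points := if rot = 1 then points.map (fun p => let (x, y, z) := unpack3 p; [x, -y, -z]) else points
  let points := if rot = 2 then points.map (fun p => let (x, y, z) := unpack3 p; [x, -z, y]) else points
  points.map unpack3

-- ===== PORT B =====
-- a 3x3 integer matrix as three rows
def Mat3 : Type := (Int × Int × Int) × (Int × Int × Int) × (Int × Int × Int)

def flipMat (f : Int) : Mat3 :=
  if f = 0 then ((1,0,0),(0,1,0),(0,0,1))
  else if f = 1 then ((0,0,1),(0,1,0),(-1,0,0))
  else if f = 2 then ((-1,0,0),(0,1,0),(0,0,-1))
  else if f = 3 then ((0,0,-1),(0,1,0),(1,0,0))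
  else if f = 4 then ((0,1,0),(-1,0,0),(0,0,1))
  else ((0,-1,0),(1,0,0),(0,0,1))

def rotMat (r : Int) : Mat3 :=
  if r = 0 then ((1,0,0),(0,0,1),(0,-1,0))
  else if r = 1 then ((1,0,0),(0,-1,0),(0,0,-1))
  else if r = 2 then ((1,0,0),(0,0,-1),(0,1,0))
  else ((1,0,0),(0,1,0),(0,0,1))

def rowDot (row : Int × Int × Int) (b : Mat3) (j : Fin 3) : Int :=
  let (a0, a1, a2) := row
  let col : Mat3 → Fin 3 → Int := fun m j =>
    match j with
    | 0 => m.1.1 | 1 => m.1.2.1 | 2 => m.1.2.2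
  a0 * col b j + a1 * (col ⟨b.2.1, b.2.2, b.1⟩ j) + a2 * (col ⟨b.2.2, b.1, b.2.1⟩ j)

def mulRow (row : Int × Int × Int) (b : Mat3) : Int × Int × Int :=
  (rowDot row b 0, rowDot row b 1, rowDot row b 2)

def matmul (a b : Mat3) : Mat3 := (mulRow a.1 b, mulRow a.2.1 b, mulRow a.2.2 b)

def applyMat (m : Mat3) (p : List Int) : Int × Int × Int :=
  let (x, y, z) := unpack3 p
  (m.1.1 * x + m.1.2.1 * y + m.1.2.2 * z,
   m.2.1.1 * x + m.2.1.2.1 * y + m.2.1.2.2 * z,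
   m.2.2.1 * x + m.2.2.2.1 * y + m.2.2.2.2 * z)

def genperm_alt (points : List (List Int)) (idx : Int) : List (Int × Int × Int) :=
  let m := matmul (rotMat (PySem.Int.floordiv idx 6)) (flipMat (PySem.Int.mod idx 6))
  points.map (applyMat m)

-- ===== PRECONDITION & SPEC =====
-- Pre_ excludes points that are not exactly 3 elements long: there Python A (and B) raise ValueError on unpacking.
def Pre_genperm (points : List (List Int)) (idx : Int) : Prop :=
  ∀ p ∈ points, p.length = 3

instance (points : List (List Int)) (idx : Int) : Decidable (Pre_genperm points idx) := by
  unfold Pre_genperm; infer_instance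

def pvWitness_genperm : List (List Int) × Int := ([[1, 2, 3], [-4, 5, 0]], 13)

def Spec_genperm (points : List (List Int)) (idx : Int) (out : List (Int × Int × Int)) : Prop := out = genperm_alt points idx
instance (points : List (List Int)) (idx : Int) (out : List (Int × Int × Int)) : Decidable (Spec_genperm points idx out) := by unfold Spec_genperm; infer_instance

-- ===== CLAIM (what is proved, stated in full; the proofs are below) =====
def Claim_equal_genperm : Prop := ∀ (points : List (List Int)) (idx : Int), Dom_genperm points idx → Pre_genperm points idx → Spec_genperm points idx (genperm points idx)

-- ===== LEMMAS AND PROOFS =====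

-- apply a matrix to a coordinate triple (applyMat m p = applyV m (unpack3 p) by definition)
def applyV (m : Mat3) (v : Int × Int × Int) : Int × Int × Int :=
  (m.1.1 * v.1 + m.1.2.1 * v.2.1 + m.1.2.2 * v.2.2,
   m.2.1.1 * v.1 + m.2.1.2.1 * v.2.1 + m.2.1.2.2 * v.2.2,
   m.2.2.1 * v.1 + m.2.2.2.1 * v.2.1 + m.2.2.2.2 * v.2.2)

-- the per-point content of A's flip and rot stages, on triples
def flipT (f : Int) (v : Int × Int × Int) : Int × Int × Int :=
  let (x, y, z) := v
  if f = 0 then (x, y, z)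
  else if f = 1 then (z, y, -x)
  else if f = 2 then (-x, y, -z)
  else if f = 3 then (-z, y, x)
  else if f = 4 then (y, -x, z)
  else (-y, x, z)

def rotT (r : Int) (v : Int × Int × Int) : Int × Int × Int :=
  let (x, y, z) := v
  if r = 0 then (x, z, -y)
  else if r = 1 then (x, -y, -z)
  else if r = 2 then (x, -z, y)
  else (x, y, z)

-- the per-point version of A's staged computation (what each fused map applies)
def stA (f r : Int) (p : List Int) : Int × Int × Int :=
  let p := if f = 0 then (let (x, y, z) := unpack3 p; [x, y, z]) else p
  let p := if f = 1 then (let (x, y, z) := unpack3 p; [z, y, -x]) else p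
  let p := if f = 2 then (let (x, y, z) := unpack3 p; [-x, y, -z]) else p
  let p := if f = 3 then (let (x, y, z) := unpack3 p; [-z, y, x]) else p
  let p := if f = 4 then (let (x, y, z) := unpack3 p; [y, -x, z]) else p
  let p := if f = 5 then (let (x, y, z) := unpack3 p; [-y, x, z]) else p
  let p := if r = 0 then (let (x, y, z) := unpack3 p; [x, z, -y]) else p
  let p := if r = 1 then (let (x, y, z) := unpack3 p; [x, -y, -z]) else p
  let p := if r = 2 then (let (x, y, z) := unpack3 p; [x, -z, y]) else p
  unpack3 p

theorem stage_eq {α : Type} (c : Prop) [Decidable c] (g : α → α) (l : List α) :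
    (if c then l.map g else l) = l.map (fun p => if c then g p else p) := by
  split_ifs with h <;> simp

theorem applyV_matmul (a b : Mat3) (v : Int × Int × Int) :
    applyV (matmul a b) v = applyV a (applyV b v) := by
  obtain ⟨⟨a11, a12, a13⟩, ⟨a21, a22, a23⟩, ⟨a31, a32, a33⟩⟩ := a
  obtain ⟨⟨b11, b12, b13⟩, ⟨b21, b22, b23⟩, ⟨b31, b32, b33⟩⟩ := b
  obtain ⟨x, y, z⟩ := v
  simp only [applyV, matmul, mulRow, rowDot, Prod.mk.injEq]
  refine ⟨by ring, by ring, by ring⟩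

theorem applyV_flipMat (f : Int) (hf0 : 0 ≤ f) (hf5 : f < 6) (v : Int × Int × Int) :
    applyV (flipMat f) v = flipT f v := by
  obtain ⟨x, y, z⟩ := v
  have hf : f = 0 ∨ f = 1 ∨ f = 2 ∨ f = 3 ∨ f = 4 ∨ f = 5 := by omega
  rcases hf with h | h | h | h | h | h <;> subst h <;>
    simp [applyV, flipMat, flipT]

theorem applyV_rotMat (r : Int) (v : Int × Int × Int) :
    applyV (rotMat r) v = rotT r v := by
  obtain ⟨x, y, z⟩ := v
  by_cases h0 : r = 0 <;> by_cases h1 : r = 1 <;> by_cases h2 : r = 2 <;>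
    simp [applyV, rotMat, rotT, h0, h1, h2]

theorem stA_eq (f r x y z : Int) (hf0 : 0 ≤ f) (hf5 : f < 6) :
    stA f r [x, y, z] = rotT r (flipT f (x, y, z)) := by
  have hf : f = 0 ∨ f = 1 ∨ f = 2 ∨ f = 3 ∨ f = 4 ∨ f = 5 := by omega
  rcases hf with h | h | h | h | h | h <;> subst h <;>
    by_cases h0 : r = 0 <;> by_cases h1 : r = 1 <;> by_cases h2 : r = 2 <;>
    simp [stA, unpack3, flipT, rotT, h0, h1, h2]

theorem genperm_spec_aux (points : List (List Int)) (idx : Int)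
    (hpre : ∀ p ∈ points, p.length = 3) :
    genperm points idx = genperm_alt points idx := by
  unfold genperm genperm_alt
  simp only [stage_eq]
  simp only [List.map_map]
  refine List.map_congr_left fun p hp => ?_
  show stA (PySem.Int.mod idx 6) (PySem.Int.floordiv idx 6) p = _
  obtain ⟨x, y, z, rfl⟩ : ∃ x y z, p = [x, y, z] := by
    match p, hpre p hp with
    | [x, y, z], _ => exact ⟨x, y, z, rfl⟩
  have hf0 : 0 ≤ PySem.Int.mod idx 6 := PySem.Int.mod_nonneg idx (by norm_num)
  have hf5 : PySem.Int.mod idx 6 < 6 := PySem.Int.mod_lt idx (by norm_num)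
  have hA : applyMat (matmul (rotMat (PySem.Int.floordiv idx 6)) (flipMat (PySem.Int.mod idx 6))) [x, y, z]
      = applyV (matmul (rotMat (PySem.Int.floordiv idx 6)) (flipMat (PySem.Int.mod idx 6))) (x, y, z) := rfl
  rw [stA_eq _ _ x y z hf0 hf5, hA, applyV_matmul,
    applyV_flipMat _ hf0 hf5, applyV_rotMat]

-- ===== VERDICT (by name: the statement is the Claim_ definition above) =====
theorem genperm_spec : Claim_equal_genperm := by
  intro points idx _ hpre
  exact genperm_spec_aux points idx hpre
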